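-- pv_equiv track=rewrite | github.com/mmileticc/digital-line-coding-simulator | main.py | AMI
-- ===== SOURCE A (Python) =====
-- from copy import copy
--
-- def AMI(sequence, U):
--     ami_sequence = copy(sequence)
--     uu = U
--     for i in range(len(sequence)):
--         if ami_sequence[i] == 1:
--             ami_sequence[i] = ami_sequence[i] * uu
--             uu *= -1
--     return ami_sequence
-- ===== SOURCE B (Python) =====
-- from copy import copy
--
-- def AMI(sequence, U):
--     result = copy(sequence)
--     ones = [i for i, x in enumerate(sequence) if x == 1]
--     for j, idx in enumerate(ones):
--         result[idx] = sequence[idx] * (U if j % 2 == 0 else -U)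
--     return result
-- ===== Notes on version B (the rewrite author's own statement) =====
-- stated objective: alternative
-- what changed: Replaces the single stateful loop (running sign flipped on every 1) with an index table: one pass collects the positions of 1s, a second pass writes sequence[idx] * (+U/-U) chosen by the position's parity in that table, so no mutable sign accumulator is threaded through the scan.
import Mathlib
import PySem

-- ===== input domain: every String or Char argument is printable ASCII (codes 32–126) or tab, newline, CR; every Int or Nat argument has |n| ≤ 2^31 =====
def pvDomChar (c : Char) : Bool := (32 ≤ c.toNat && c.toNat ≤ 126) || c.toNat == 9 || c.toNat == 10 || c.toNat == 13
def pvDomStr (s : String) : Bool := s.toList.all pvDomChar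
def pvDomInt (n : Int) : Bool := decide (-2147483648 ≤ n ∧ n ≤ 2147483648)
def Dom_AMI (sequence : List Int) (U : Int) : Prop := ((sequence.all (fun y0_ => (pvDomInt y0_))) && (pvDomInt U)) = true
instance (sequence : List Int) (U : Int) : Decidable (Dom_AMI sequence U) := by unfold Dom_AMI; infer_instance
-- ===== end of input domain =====

-- B replaces A's stateful scan (running sign flipped at each 1) by an index table of the
-- positions of 1s plus a parity-indexed second pass; same return value, no speed claim.

-- ===== PORT A =====
-- A's loop reads ami_sequence[i] only at position i, after writing only positions < i,
-- so the in-place index loop is exactly this structural left-to-right recursion over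
-- the same state (remaining list, current uu).
def AMIgo (xs : List Int) (uu : Int) : List Int :=
  match xs with
  | [] => []
  | x :: rest => if x == 1 then (x * uu) :: AMIgo rest (uu * -1) else x :: AMIgo rest uu

def AMI (sequence : List Int) (U : Int) : List Int :=
  AMIgo sequence U

-- ===== PORT B =====
-- [i for i, x in enumerate(sequence) if x == 1]
def bOnes (xs : List Int) : List Int :=
  ((PySem.List.enumerate xs 0).filter (fun p => p.2 == 1)).map Prod.fst

-- U if j % 2 == 0 else -U  (j is a nonnegative enumerate index, so Int.emod = Python %)
def bSign (U j : Int) : Int := if j % 2 == 0 then U else -U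

-- the 'for j, idx in enumerate(ones)' write loop; idx is always a valid nonnegative index
def bApply (seq : List Int) (U : Int) (res : List Int) (pairs : List (Int × Int)) : List Int :=
  pairs.foldl (fun r p => r.set p.2.toNat (seq.getD p.2.toNat 0 * bSign U p.1)) res

def AMI_alt (sequence : List Int) (U : Int) : List Int :=
  bApply sequence U sequence (PySem.List.enumerate (bOnes sequence) 0)

-- ===== PRECONDITION & SPEC =====
def Spec_AMI (sequence : List Int) (U : Int) (out : List Int) : Prop := out = AMI_alt sequence U
instance (sequence : List Int) (U : Int) (out : List Int) : Decidable (Spec_AMI sequence U out) := by unfold Spec_AMI; infer_instance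

-- ===== CLAIM (what is proved, stated in full; the proofs are below) =====
def Claim_equal_AMI : Prop := ∀ (sequence : List Int) (U : Int), Dom_AMI sequence U → Spec_AMI sequence U (AMI sequence U)

-- ===== LEMMAS AND PROOFS =====

-- enumerate with shifted start
theorem enumerate_shift {α : Type} (xs : List α) (s : Int) :
    PySem.List.enumerate xs (s + 1) = (PySem.List.enumerate xs s).map (fun p => (p.1 + 1, p.2)) := by
  induction xs generalizing s with
  | nil => simp [PySem.List.enumerate_nil]
  | cons x rest ih => simp [PySem.List.enumerate_cons, ih (s + 1)]

-- enumerate of a mapped list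
theorem enumerate_map {α β : Type} (f : α → β) (xs : List α) (s : Int) :
    PySem.List.enumerate (xs.map f) s = (PySem.List.enumerate xs s).map (fun p => (p.1, f p.2)) := by
  induction xs generalizing s with
  | nil => simp [PySem.List.enumerate_nil]
  | cons x rest ih => simp [PySem.List.enumerate_cons, ih (s + 1)]

-- unfolding bOnes on a cons
theorem bOnes_cons (x : Int) (xs : List Int) :
    bOnes (x :: xs) =
      if x == 1 then (0 : Int) :: (bOnes xs).map (· + 1) else (bOnes xs).map (· + 1) := by
  have h1 : PySem.List.enumerate xs (0 + 1) = (PySem.List.enumerate xs 0).map (fun p => (p.1 + 1, p.2)) :=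
    enumerate_shift xs 0
  unfold bOnes
  rw [PySem.List.enumerate_cons, h1]
  by_cases hx : x == 1 <;>
    simp [hx, List.filter_map, List.map_map] <;> rfl

-- elements of bOnes are nonnegative
theorem bOnes_nonneg (xs : List Int) : ∀ i ∈ bOnes xs, 0 ≤ i := by
  induction xs with
  | nil => simp [bOnes, PySem.List.enumerate_nil]
  | cons x rest ih =>
    intro i hi
    rw [bOnes_cons] at hi
    by_cases hx : x == 1
    · simp [hx] at hi
      rcases hi with h | ⟨j, hj, rfl⟩
      · omega
      · have := ih j hj; omega
    · simp [hx] at hi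
      rcases hi with ⟨j, hj, rfl⟩
      have := ih j hj; omega

-- shifting all write indices by one past a fixed head
theorem bApply_shift_idx (seq : List Int) (U : Int) (x x' : Int)
    (pairs : List (Int × Int)) (hnn : ∀ p ∈ pairs, 0 ≤ p.2) :
    ∀ r : List Int,
      bApply (x :: seq) U (x' :: r) (pairs.map (fun p => (p.1, p.2 + 1))) =
        x' :: bApply seq U r pairs := by
  induction pairs with
  | nil => intro r; rfl
  | cons p rest ih =>
    intro r
    have hp : 0 ≤ p.2 := hnn p (by simp)
    have ht : (p.2 + 1).toNat = p.2.toNat + 1 := by omega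
    simp only [bApply, List.map_cons, List.foldl_cons] at *
    rw [ht]
    simp only [List.set_cons_succ, List.getD_cons_succ]
    exact ih (fun q hq => hnn q (by simp [hq])) _

-- shifting all parity indices by one flips the sign parameter
theorem bSign_succ (U j : Int) : bSign U (j + 1) = bSign (-U) j := by
  unfold bSign
  have h2 : (0:Int) < 2 := by norm_num
  by_cases h : j % 2 == 0
  · have hj : j % 2 = 0 := by simpa using h
    have : (j + 1) % 2 = 1 := by omega
    simp [hj, this]
  · have hj : j % 2 ≠ 0 := by simpa using h
    have hj' : j % 2 = 1 := by
      have := Int.emod_emod_of_dvd j (dvd_refl 2)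
      omega
    have : (j + 1) % 2 = 0 := by omega
    simp [hj', this]

theorem bApply_shift_parity (seq : List Int) (U : Int) (pairs : List (Int × Int)) :
    ∀ r : List Int,
      bApply seq U r (pairs.map (fun p => (p.1 + 1, p.2))) = bApply seq (-U) r pairs := by
  induction pairs with
  | nil => intro r; rfl
  | cons p rest ih =>
    intro r
    simp only [bApply, List.map_cons, List.foldl_cons] at *
    rw [bSign_succ]
    exact ih _

-- the core equivalence: B's two-pass construction equals A's stateful recursion
theorem AMI_alt_eq_go (xs : List Int) : ∀ U : Int, AMI_alt xs U = AMIgo xs U := by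
  induction xs with
  | nil => intro U; rfl
  | cons x rest ih =>
    intro U
    have hnnE : ∀ p ∈ (PySem.List.enumerate (bOnes rest) 0).map (fun p => (p.1 + 1, p.2)), 0 ≤ p.2 := by
      intro p hp
      simp only [List.mem_map] at hp
      rcases hp with ⟨q, hq, rfl⟩
      rcases (PySem.List.mem_enumerate_iff _ _ _).1 hq with ⟨k, hk, rfl⟩
      exact bOnes_nonneg rest _ (by simp)
    have hnnE0 : ∀ p ∈ PySem.List.enumerate (bOnes rest) 0, 0 ≤ p.2 := by
      intro p hp
      rcases (PySem.List.mem_enumerate_iff _ _ _).1 hp with ⟨k, hk, rfl⟩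
      exact bOnes_nonneg rest _ (by simp)
    unfold AMI_alt
    rw [bOnes_cons]
    by_cases hx : x == 1
    · rw [if_pos hx, PySem.List.enumerate_cons, enumerate_map, enumerate_shift (bOnes rest) 0]
      show bApply (x :: rest) U (x :: rest) (((0,0) : Int × Int) :: _) = _
      simp only [bApply, List.foldl_cons]
      have hstep : (x :: rest).set ((0:Int)).toNat ((x :: rest).getD ((0:Int)).toNat 0 * bSign U 0)
          = (x * U) :: rest := by
        simp [bSign]
      rw [hstep]
      show bApply (x :: rest) U ((x * U) :: rest)
        (((PySem.List.enumerate (bOnes rest) 0).map (fun p => (p.1 + 1, p.2))).map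
          (fun p => (p.1, p.2 + 1))) = _
      rw [bApply_shift_idx rest U x (x * U)
            ((PySem.List.enumerate (bOnes rest) 0).map (fun p => (p.1 + 1, p.2))) hnnE rest,
          bApply_shift_parity rest U (PySem.List.enumerate (bOnes rest) 0) rest]
      have hih := ih (-U); unfold AMI_alt at hih; rw [hih]
      simp [AMIgo, hx]
    · rw [if_neg (by simpa using hx), enumerate_map]
      show bApply (x :: rest) U (x :: rest)
        ((PySem.List.enumerate (bOnes rest) 0).map (fun p => (p.1, p.2 + 1))) = _
      rw [bApply_shift_idx rest U x x (PySem.List.enumerate (bOnes rest) 0) hnnE0 rest]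
      have hih := ih U; unfold AMI_alt at hih; rw [hih]
      simp [AMIgo, hx]

-- ===== VERDICT (by name: the statement is the Claim_ definition above) =====
theorem AMI_spec : Claim_equal_AMI := by
  intro sequence U _
  unfold Spec_AMI AMI
  exact (AMI_alt_eq_go sequence U).symm
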